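-- pv_equiv track=rewrite | github.com/paulofreitasnobrega/coursera-introducao-a-ciencia-da-computacao-com-python-parte-2 | week2/menor_nome_video.py | nomeMaisCurto
-- ===== SOURCE A (Python) =====
-- def nomeMaisCurto(nomes):
-- 	# se não receber uma lista de nomes valida, retorne "Anônimo"
-- 	if not len(nomes) or type(nomes) != list:
-- 		return "Anônimo"
--
-- 	# inicia o nome curto com o primeiro nome da lista recebida
-- 	nomeCurto = nomes[0]
-- 	comprimentoDoNomeCurto = len(nomes[0])
--
-- 	for nome in nomes:
-- 		# quando houver espaços em branco, remova-os
-- 		nome = nome.strip()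
--
-- 		# se encontrar um nome menor que o nome definido como mais curto,
-- 		# substitua-o
-- 		if len(nome) < comprimentoDoNomeCurto:
-- 			comprimentoDoNomeCurto = len(nome)
-- 			nomeCurto = nome
--
-- 		# se houver nomes com o mesmo comprimento, ordene-os alfanumericamente
-- 		# e defina como mais curto o primeiro resultado
-- 		elif len(nome) == comprimentoDoNomeCurto and nomeCurto != nome:
-- 			listaDeComparacao = sorted([nomeCurto, nome])
-- 			nomeCurto = listaDeComparacao[0]
--
-- 	# retorne o nome mais curto capitalizado
-- 	return nomeCurto.capitalize()
-- ===== SOURCE B (Python) =====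
-- def nomeMaisCurto(nomes):
-- 	# se não receber uma lista de nomes valida, retorne "Anônimo"
-- 	if not len(nomes) or type(nomes) != list:
-- 		return "Anônimo"
--
-- 	# two-pass decomposition: strip everything, find the minimum stripped
-- 	# length, then pick the lexicographically smallest name of that length
-- 	stripped = [nome.strip() for nome in nomes]
-- 	menor = min(len(s) for s in stripped)
-- 	return min(s for s in stripped if len(s) == menor).capitalize()
-- ===== Notes on version B (the rewrite author's own statement) =====
-- stated objective: simpler
-- what changed: Replaces A's single interleaved running-minimum scan (with its pairwise sorted() tie-break inside the loop) by a two-pass decomposition: strip all names, take the minimum stripped length, then pick the lexicographically smallest name of that length.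
import Mathlib
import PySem

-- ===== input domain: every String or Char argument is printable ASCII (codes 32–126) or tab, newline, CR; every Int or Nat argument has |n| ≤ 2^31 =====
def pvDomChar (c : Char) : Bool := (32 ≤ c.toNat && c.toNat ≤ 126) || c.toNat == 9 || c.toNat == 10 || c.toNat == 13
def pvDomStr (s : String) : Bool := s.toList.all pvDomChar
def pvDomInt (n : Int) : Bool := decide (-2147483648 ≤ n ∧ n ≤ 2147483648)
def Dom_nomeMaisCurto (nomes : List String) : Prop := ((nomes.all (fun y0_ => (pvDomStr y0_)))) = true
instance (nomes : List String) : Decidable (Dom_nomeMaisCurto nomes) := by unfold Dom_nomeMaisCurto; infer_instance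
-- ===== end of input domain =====

-- B replaces A's single interleaved running-minimum scan by a two-pass decomposition
-- (minimum stripped length first, then the lexicographically smallest name of that length);
-- objective: simpler.

-- ===== PORT A =====
-- shared primitive: Python str.capitalize() (first char upper, rest lower); exact on the ASCII domain
def pyCapitalize (s : String) : String :=
  match s.toList with
  | [] => s
  | c :: t => String.ofList (PySem.Chars.upperChar c :: t.map PySem.Chars.lowerChar)

-- the body of A's for-loop, on the state (nomeCurto, comprimentoDoNomeCurto)
def nomeMaisCurtoStep (st : String × Int) (nome0 : String) : String × Int :=
  let nome := PySem.Str.strip nome0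
  if PySem.Str.len nome < st.2 then (nome, PySem.Str.len nome)
  else if PySem.Str.len nome = st.2 ∧ st.1 ≠ nome then
    (((PySem.List.sorted [st.1, nome] (fun x => x)).headD ""), st.2)
  else st

def nomeMaisCurto (nomes : List String) : String :=
  if nomes.length = 0 then "Anônimo"
  else
    let nc := (PySem.List.pyGet? nomes 0).getD ""
    let st := nomes.foldl nomeMaisCurtoStep (nc, PySem.Str.len nc)
    pyCapitalize st.1

-- ===== PORT B =====
def nomeMaisCurto_alt (nomes : List String) : String :=
  if nomes.length = 0 then "Anônimo"
  else
    let stripped := nomes.map PySem.Str.strip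
    let menor := (PySem.List.min? (stripped.map PySem.Str.len) (fun x => x)).getD 0
    pyCapitalize ((PySem.List.min? (stripped.filter (fun s => PySem.Str.len s == menor)) (fun x => x)).getD "")

-- ===== PRECONDITION & SPEC =====
def Spec_nomeMaisCurto (nomes : List String) (out : String) : Prop := out = nomeMaisCurto_alt nomes
instance (nomes : List String) (out : String) : Decidable (Spec_nomeMaisCurto nomes out) := by unfold Spec_nomeMaisCurto; infer_instance

-- ===== CLAIM (what is proved, stated in full; the proofs are below) =====
def Claim_equal_nomeMaisCurto : Prop := ∀ (nomes : List String), Dom_nomeMaisCurto nomes → Spec_nomeMaisCurto nomes (nomeMaisCurto nomes)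

-- ===== LEMMAS AND PROOFS =====

-- the (length, lexicographic) order both programs minimise over
def pvSq (a b : String) : Prop :=
  PySem.Str.len a < PySem.Str.len b ∨ (PySem.Str.len a = PySem.Str.len b ∧ a ≤ b)

-- "m is the (length, lex)-minimum of l"
def pvIsBest (l : List String) (m : String) : Prop := m ∈ l ∧ ∀ y ∈ l, pvSq m y

-- one combining step of the reference minimum
def pvComb (m s : String) : String :=
  if PySem.Str.len s < PySem.Str.len m then s
  else if PySem.Str.len s = PySem.Str.len m then min m s else m

def pvRefMin (m : String) (l : List String) : String :=
  l.foldl (fun acc x => pvComb acc (PySem.Str.strip x)) m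

theorem pvSq_refl (a : String) : pvSq a a := Or.inr ⟨rfl, le_refl a⟩

theorem pvSq_trans {a b c : String} (h1 : pvSq a b) (h2 : pvSq b c) : pvSq a c := by
  rcases h1 with h1 | ⟨h1, h1'⟩ <;> rcases h2 with h2 | ⟨h2, h2'⟩
  · exact Or.inl (h1.trans h2)
  · exact Or.inl (h2 ▸ h1)
  · exact Or.inl (h1 ▸ h2)
  · exact Or.inr ⟨h1.trans h2, h1'.trans h2'⟩

theorem pvSq_antisymm {a b : String} (h1 : pvSq a b) (h2 : pvSq b a) : a = b := by
  rcases h1 with h1 | ⟨h1, h1'⟩ <;> rcases h2 with h2 | ⟨h2, h2'⟩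
  · exact absurd (h1.trans h2) (lt_irrefl _)
  · exact absurd h1 (h2 ▸ lt_irrefl _)
  · exact absurd h2 (h1 ▸ lt_irrefl _)
  · exact le_antisymm h1' h2'

theorem pvIsBest_unique {l : List String} {a b : String}
    (ha : pvIsBest l a) (hb : pvIsBest l b) : a = b :=
  pvSq_antisymm (ha.2 b hb.1) (hb.2 a ha.1)

theorem pvComb_mem (m s : String) : pvComb m s = m ∨ pvComb m s = s := by
  unfold pvComb
  split_ifs with h1 h2
  · exact Or.inr rfl
  · rcases min_choice m s with h | h
    · exact Or.inl h
    · exact Or.inr h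
  · exact Or.inl rfl

theorem pvComb_sq_left (m s : String) : pvSq (pvComb m s) m := by
  unfold pvComb
  split_ifs with h1 h2
  · exact Or.inl h1
  · rcases min_choice m s with h | h <;> rw [h]
    · exact pvSq_refl m
    · exact Or.inr ⟨h2, by rw [← h]; exact min_le_left m s⟩
  · exact pvSq_refl m

theorem pvComb_sq_right (m s : String) : pvSq (pvComb m s) s := by
  unfold pvComb
  split_ifs with h1 h2
  · exact pvSq_refl s
  · rcases min_choice m s with h | h <;> rw [h]
    · exact Or.inr ⟨h2.symm, by rw [← h]; exact min_le_right m s⟩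
    · exact pvSq_refl s
  · exact Or.inl (lt_of_le_of_ne (not_lt.mp h1) fun h => h2 h.symm)

-- strip shrinks, and an unshrunk strip is the identity
theorem pv_strip_toList (s : String) :
    (PySem.Str.strip s).toList = PySem.Chars.strip s.toList := by
  simp [PySem.Str.strip]

theorem pv_strip_sublist (s : String) : (PySem.Str.strip s).toList.Sublist s.toList := by
  rw [pv_strip_toList]
  unfold PySem.Chars.strip PySem.Chars.rstrip PySem.Chars.lstrip
  have h1 := (List.dropWhile_sublist (l := (List.dropWhile PySem.Chars.isspace s.toList).reverse)
    PySem.Chars.isspace).reverse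
  rw [List.reverse_reverse] at h1
  exact h1.trans (List.dropWhile_sublist _)

theorem pv_len_strip_le (s : String) :
    PySem.Str.len (PySem.Str.strip s) ≤ PySem.Str.len s := by
  simp only [PySem.Str.len]
  exact_mod_cast (pv_strip_sublist s).length_le

theorem pv_strip_eq_of_len_eq {s : String}
    (h : PySem.Str.len (PySem.Str.strip s) = PySem.Str.len s) : PySem.Str.strip s = s := by
  simp only [PySem.Str.len, Int.natCast_inj] at h
  have h' : (PySem.Str.strip s).toList = s.toList := (pv_strip_sublist s).eq_of_length h
  have h2 := congrArg String.ofList h'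
  rwa [String.ofList_toList, String.ofList_toList] at h2

-- sorted of a two-element list of distinct strings picks the smaller one
theorem pv_sorted_pair_head {a b : String} (h : a ≠ b) :
    (PySem.List.sorted [a, b] (fun x => x)).headD "" = min a b := by
  rcases lt_or_gt_of_ne h with hlt | hgt
  · rw [PySem.List.sorted_eq_of_perm_of_pairwise_lt [a, b] [a, b] (fun x => x)
      (List.Perm.refl _)
      (List.Pairwise.cons (fun y hy => by rw [List.mem_singleton] at hy; subst hy; exact hlt)
        (List.pairwise_singleton _ _))]
    rw [List.headD_cons]
    exact (min_eq_left hlt.le).symm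
  · rw [PySem.List.sorted_eq_of_perm_of_pairwise_lt [a, b] [b, a] (fun x => x)
      (List.Perm.swap a b [])
      (List.Pairwise.cons (fun y hy => by rw [List.mem_singleton] at hy; subst hy; exact hgt)
        (List.pairwise_singleton _ _))]
    rw [List.headD_cons]
    exact (min_eq_right hgt.le).symm

-- A's loop body is exactly the reference combining step
theorem pv_step_eq (m x : String) :
    nomeMaisCurtoStep (m, PySem.Str.len m) x =
      (pvComb m (PySem.Str.strip x), PySem.Str.len (pvComb m (PySem.Str.strip x))) := by
  unfold nomeMaisCurtoStep pvComb
  set s := PySem.Str.strip x with hs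
  by_cases h1 : PySem.Str.len s < PySem.Str.len m
  · simp only [if_pos h1]
  · by_cases h2 : PySem.Str.len s = PySem.Str.len m
    · by_cases h3 : m = s
      · simp only [if_neg h1, if_pos h2,
          if_neg (fun hc => hc.2 h3 : ¬(PySem.Str.len s = PySem.Str.len m ∧ m ≠ s))]
        rw [h3, min_self]
      · simp only [if_neg h1, if_pos h2,
          if_pos (⟨h2, h3⟩ : PySem.Str.len s = PySem.Str.len m ∧ m ≠ s)]
        rw [pv_sorted_pair_head h3]
        have hlenmin : PySem.Str.len (min m s) = PySem.Str.len m := by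
          rcases min_choice m s with hmn | hmn <;> rw [hmn]; exact h2
        rw [hlenmin]
    · simp only [if_neg h1, if_neg h2,
        if_neg (fun hc => h2 hc.1 : ¬(PySem.Str.len s = PySem.Str.len m ∧ m ≠ s))]

-- A's whole loop computes the reference minimum (with the length cached in the state)
theorem pv_foldl_eq (l : List String) (m : String) :
    l.foldl nomeMaisCurtoStep (m, PySem.Str.len m) =
      (pvRefMin m l, PySem.Str.len (pvRefMin m l)) := by
  induction l generalizing m with
  | nil => rfl
  | cons x t ih =>
    simp only [List.foldl_cons, pv_step_eq m x]
    rw [ih (pvComb m (PySem.Str.strip x))]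
    rfl

theorem pv_comb_strip_self (x : String) : pvComb x (PySem.Str.strip x) = PySem.Str.strip x := by
  unfold pvComb
  rcases lt_or_eq_of_le (pv_len_strip_le x) with h | h
  · rw [if_pos h]
  · rw [if_neg (by rw [h]; exact lt_irrefl _), if_pos h, pv_strip_eq_of_len_eq h, min_self]

-- the reference minimum is the (length, lex)-minimum of the stripped names (plus the seed)
theorem pv_refMin_best (l : List String) (m : String) :
    pvIsBest (m :: l.map PySem.Str.strip) (pvRefMin m l) := by
  induction l generalizing m with
  | nil =>
    refine ⟨by simp [pvRefMin], ?_⟩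
    intro y hy
    rw [List.map_nil, List.mem_singleton] at hy
    rw [hy]; exact pvSq_refl m
  | cons x t ih =>
    have hstep : pvRefMin m (x :: t) = pvRefMin (pvComb m (PySem.Str.strip x)) t := rfl
    obtain ⟨hmem, hmin⟩ := ih (pvComb m (PySem.Str.strip x))
    constructor
    · rw [List.map_cons, hstep]
      rcases List.mem_cons.mp hmem with h | h
      · rcases pvComb_mem m (PySem.Str.strip x) with hc | hc
        · rw [h, hc]; exact List.mem_cons_self
        · rw [h, hc]; exact List.mem_cons.mpr (Or.inr List.mem_cons_self)
      · exact List.mem_cons.mpr (Or.inr (List.mem_cons.mpr (Or.inr h)))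
    · intro y hy
      rw [List.map_cons] at hy
      rw [hstep]
      rcases List.mem_cons.mp hy with h | h
      · rw [h]
        exact pvSq_trans (hmin _ List.mem_cons_self) (pvComb_sq_left m _)
      · rcases List.mem_cons.mp h with h' | h'
        · rw [h']
          exact pvSq_trans (hmin _ List.mem_cons_self) (pvComb_sq_right m _)
        · exact hmin y (List.mem_cons.mpr (Or.inr h'))

-- B's two passes also produce the (length, lex)-minimum
theorem pv_alt_best (L : List String) (hL : L ≠ []) :
    pvIsBest L ((PySem.List.min?
        (L.filter (fun s => PySem.Str.len s == (PySem.List.min? (L.map PySem.Str.len) (fun x => x)).getD 0))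
        (fun x => x)).getD "") := by
  obtain ⟨v, hv⟩ : ∃ v, PySem.List.min? (L.map PySem.Str.len) (fun x => x) = some v := by
    rcases h : PySem.List.min? (L.map PySem.Str.len) (fun x => x) with _ | v
    · exact absurd (List.map_eq_nil_iff.mp ((PySem.List.min?_eq_none_iff _ _).mp h)) hL
    · exact ⟨v, rfl⟩
  have hvmem : v ∈ L.map PySem.Str.len := PySem.List.min?_mem hv
  have hvmin : ∀ w ∈ L.map PySem.Str.len, v ≤ w := by
    intro w hw; exact PySem.List.min?_isMin hv w hw
  obtain ⟨s0, hs0L, hs0⟩ := List.mem_map.mp hvmem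
  have hfil : s0 ∈ L.filter (fun s => PySem.Str.len s == v) := by
    rw [List.mem_filter]; exact ⟨hs0L, by simpa using hs0⟩
  obtain ⟨r, hr⟩ : ∃ r, PySem.List.min?
      (L.filter (fun s => PySem.Str.len s == v)) (fun x => x) = some r := by
    rcases h : PySem.List.min? (L.filter (fun s => PySem.Str.len s == v)) (fun x => x) with _ | r
    · rw [(PySem.List.min?_eq_none_iff _ _).mp h] at hfil; simp at hfil
    · exact ⟨r, rfl⟩
  have hrfil := PySem.List.min?_mem hr
  have hrL : r ∈ L := (List.mem_filter.mp hrfil).1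
  have hrlen : PySem.Str.len r = v := by
    have := (List.mem_filter.mp hrfil).2; simpa using this
  rw [hv]
  simp only [Option.getD_some]
  rw [hr]
  simp only [Option.getD_some]
  refine ⟨hrL, ?_⟩
  intro y hy
  by_cases hylen : PySem.Str.len y = v
  · have hyfil : y ∈ L.filter (fun s => PySem.Str.len s == v) := by
      rw [List.mem_filter]; exact ⟨hy, by simpa using hylen⟩
    exact Or.inr ⟨by rw [hrlen, hylen], PySem.List.min?_isMin hr y hyfil⟩
  · have hvy : v ≤ PySem.Str.len y := hvmin _ (List.mem_map.mpr ⟨y, hy, rfl⟩)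
    exact Or.inl (by rw [hrlen]; exact lt_of_le_of_ne hvy (Ne.symm hylen))

-- ===== VERDICT (by name: the statement is the Claim_ definition above) =====
theorem nomeMaisCurto_spec : Claim_equal_nomeMaisCurto := by
  intro nomes _
  unfold Spec_nomeMaisCurto nomeMaisCurto nomeMaisCurto_alt
  match nomes with
  | [] => rfl
  | x :: xs =>
    have hfold : (x :: xs).foldl nomeMaisCurtoStep (x, PySem.Str.len x) =
        (pvRefMin (PySem.Str.strip x) xs, PySem.Str.len (pvRefMin (PySem.Str.strip x) xs)) := by
      rw [List.foldl_cons, pv_step_eq x x, pv_comb_strip_self x, pv_foldl_eq]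
    have hbestA : pvIsBest ((x :: xs).map PySem.Str.strip) (pvRefMin (PySem.Str.strip x) xs) := by
      rw [List.map_cons]
      exact pv_refMin_best xs (PySem.Str.strip x)
    have hbestB := pv_alt_best ((x :: xs).map PySem.Str.strip) (by simp)
    have hget : (PySem.List.pyGet? (x :: xs) 0).getD "" = x := by
      simp [PySem.List.pyGet?, PySem.List.pyIdx?]
    have key : ((x :: xs).foldl nomeMaisCurtoStep
        ((PySem.List.pyGet? (x :: xs) 0).getD "", PySem.Str.len ((PySem.List.pyGet? (x :: xs) 0).getD ""))).1 =
        (PySem.List.min?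
          (((x :: xs).map PySem.Str.strip).filter (fun s => PySem.Str.len s ==
            (PySem.List.min? (((x :: xs).map PySem.Str.strip).map PySem.Str.len) (fun x => x)).getD 0))
          (fun x => x)).getD "" := by
      rw [hget, hfold]
      exact pvIsBest_unique hbestA hbestB
    exact congrArg pyCapitalize key
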